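-- pv_equiv track=rewrite | github.com/romanyakovlev/18_price_format | format_price.py | separate_by_3_signs_from_right
-- ===== SOURCE A (Python) =====
-- def separate_by_3_signs_from_right(string):
--     """
--     Функция форматирует строку, ставя разделитель в виде пробела после
--     каждого 3-го числа. Так как отсчет для разделения начинаем слева, делаем
--     реверс строки и разделяем ее, после чего делаем реверс обратно.
--     """
--     signs_in_1000 = 3
--     reversed_left_side = string[::-1]
--     #formatted_left_side_string_list = []
--     reversed_list_of_separated_elements = []
--     for elem_index in range(0, len(reversed_left_side), signs_in_1000):
--         reversed_three_sign_list = reversed_left_side[elem_index: elem_index+signs_in_1000]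
--         three_sign_string = ''.join(list(reversed(reversed_three_sign_list)))
--         reversed_list_of_separated_elements.append(three_sign_string)
--     formatted_string = ' '.join(list(reversed(reversed_list_of_separated_elements)))
--     return formatted_string
-- ===== SOURCE B (Python) =====
-- def separate_by_3_signs_from_right(string):
--     """Forward single pass: the leading group has len(string) % 3 chars, the
--     rest are consecutive triples; no reversing anywhere."""
--     r = len(string) % 3
--     groups = [string[:r]] if r else []
--     groups += [string[i:i + 3] for i in range(r, len(string), 3)]
--     return ' '.join(groups)
-- ===== Notes on version B (the rewrite author's own statement) =====
-- stated objective: simpler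
-- what changed: Replaces A's triple-reversal scheme (reverse the string, chunk, reverse each chunk back via list(reversed(...)), reverse the chunk list) with a single forward walk: the leading group's length is len % 3, then consecutive 3-char slices, joined once; dropping the per-chunk reversals and list building also makes it measurably faster by a constant factor.
import Mathlib
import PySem

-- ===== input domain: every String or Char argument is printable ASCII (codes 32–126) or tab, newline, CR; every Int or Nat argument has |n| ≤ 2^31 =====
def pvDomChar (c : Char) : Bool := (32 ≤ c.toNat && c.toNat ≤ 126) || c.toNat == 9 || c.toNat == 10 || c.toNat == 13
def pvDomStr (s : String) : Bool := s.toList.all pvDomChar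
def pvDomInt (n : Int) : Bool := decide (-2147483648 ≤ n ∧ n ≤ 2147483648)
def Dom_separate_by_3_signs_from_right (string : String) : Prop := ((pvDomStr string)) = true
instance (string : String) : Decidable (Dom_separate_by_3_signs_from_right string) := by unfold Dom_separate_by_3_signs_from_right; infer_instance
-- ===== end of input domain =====

-- B replaces A's reverse/chunk/re-reverse scheme by a single forward walk whose leading
-- group has length len % 3 (objective: simpler).

-- ===== PORT A =====
def separate_by_3_signs_from_right (string : String) : String :=
  let signs_in_1000 : Int := 3
  -- string[::-1]
  let reversed_left_side : List Char :=
    (PySem.List.slice? string.toList none none (-1)).getD []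
  -- for elem_index in range(0, len(reversed_left_side), 3): append the chunk, re-reversed
  let reversed_list_of_separated_elements : List (List Char) :=
    (PySem.List.pyRange 0 (reversed_left_side.length : Int) signs_in_1000).foldl
      (fun acc elem_index =>
        acc ++ [(PySem.List.slice reversed_left_side (some elem_index)
                  (some (elem_index + signs_in_1000))).reverse])
      []
  -- ' '.join(list(reversed(...)))
  String.ofList (PySem.Chars.join [' '] reversed_list_of_separated_elements.reverse)

-- ===== PORT B =====
def separate_by_3_signs_from_right_alt (string : String) : String :=
  let s := string.toList
  let r := s.length % 3
  let groups : List (List Char) :=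
    (if r = 0 then [] else [PySem.List.slice s none (some (r : Int))]) ++
      (PySem.List.pyRange (r : Int) (s.length : Int) 3).map
        (fun i => PySem.List.slice s (some i) (some (i + 3)))
  String.ofList (PySem.Chars.join [' '] groups)

-- ===== PRECONDITION & SPEC =====
def Spec_separate_by_3_signs_from_right (string : String) (out : String) : Prop := out = separate_by_3_signs_from_right_alt string
instance (string : String) (out : String) : Decidable (Spec_separate_by_3_signs_from_right string out) := by unfold Spec_separate_by_3_signs_from_right; infer_instance

-- ===== CLAIM (what is proved, stated in full; the proofs are below) =====
def Claim_equal_separate_by_3_signs_from_right : Prop := ∀ (string : String), Dom_separate_by_3_signs_from_right string → Spec_separate_by_3_signs_from_right string (separate_by_3_signs_from_right string)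

-- ===== LEMMAS AND PROOFS =====

-- proof-only helper: split a list into consecutive 3-chunks from the left
def chunks3 (l : List Char) : List (List Char) :=
  if h : l = [] then [] else l.take 3 :: chunks3 (l.drop 3)
termination_by l.length
decreasing_by
  have hl : l.length ≠ 0 := by simpa using h
  simp
  omega

lemma chunks3_nil : chunks3 [] = [] := by
  unfold chunks3
  rfl

lemma chunks3_nonempty (l : List Char) (h : l ≠ []) :
    chunks3 l = l.take 3 :: chunks3 (l.drop 3) := by
  conv_lhs => unfold chunks3
  rw [dif_neg h]

lemma pyRange3_nil (a b : Int) (h : b ≤ a) : PySem.List.pyRange a b 3 = [] := by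
  rw [PySem.List.pyRange_of_pos a b (by norm_num), if_neg (by omega)]
  simp

lemma pyRange3_cons (a b : Int) (h : a < b) :
    PySem.List.pyRange a b 3 = a :: PySem.List.pyRange (a + 3) b 3 := by
  rw [PySem.List.pyRange_of_pos a b (by norm_num),
      PySem.List.pyRange_of_pos (a + 3) b (by norm_num), if_pos h]
  by_cases h3 : a + 3 < b
  · rw [if_pos h3]
    have hn : ((b - a + 3 - 1) / 3).toNat = ((b - (a + 3) + 3 - 1) / 3).toNat + 1 := by
      omega
    rw [hn, List.range_succ_eq_map]
    simp only [List.map_cons, List.map_map]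
    congr 1
    · norm_num
    · apply List.map_congr_left
      intro k _
      simp only [Function.comp_apply, Nat.succ_eq_add_one]
      push_cast
      ring
  · rw [if_neg h3]
    have hn : ((b - a + 3 - 1) / 3).toNat = 1 := by omega
    simp [hn, List.range_succ]

-- the range-of-threes loop computes the 3-chunks of the tail
lemma map_slice_chunks3 (s : List Char) : ∀ (m k : Nat), s.length - k = m →
    (PySem.List.pyRange (k : Int) (s.length : Int) 3).map
        (fun i => PySem.List.slice s (some i) (some (i + 3))) = chunks3 (s.drop k) := by
  intro m
  induction m using Nat.strong_induction_on with
  | _ m ih =>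
    intro k hk
    by_cases hlt : k < s.length
    · rw [pyRange3_cons _ _ (by exact_mod_cast hlt), List.map_cons]
      have h3 : ((k : Int) + 3) = ((k + 3 : Nat) : Int) := by push_cast; ring
      rw [h3, ih (s.length - (k + 3)) (by omega) (k + 3) rfl]
      rw [chunks3_nonempty (s.drop k) (by
        intro hnil
        have := congrArg List.length hnil
        simp at this
        omega)]
      congr 1
      · rw [PySem.List.slice_natCast]
        congr 1
        omega
      · congr 1
        rw [List.drop_drop]
        try congr 1
        try omega
    · rw [pyRange3_nil _ _ (by exact_mod_cast Nat.le_of_not_lt hlt),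
          List.drop_eq_nil_of_le (by omega)]
      simp [chunks3_nil]

lemma chunks3_append (ys : List Char) : ∀ (m : Nat) (xs : List Char), xs.length = m →
    3 ∣ xs.length → chunks3 (xs ++ ys) = chunks3 xs ++ chunks3 ys := by
  intro m
  induction m using Nat.strong_induction_on with
  | _ m ih =>
    intro xs hm hdvd
    cases xs with
    | nil => simp [chunks3_nil]
    | cons c cs =>
      have hlc : (c :: cs).length = cs.length + 1 := by simp
      have hlen : 3 ≤ (c :: cs).length := by omega
      rw [chunks3_nonempty ((c :: cs) ++ ys) (by simp),
          chunks3_nonempty (c :: cs) (by simp)]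
      rw [List.take_append_of_le_length hlen, List.drop_append_of_le_length hlen]
      have hdl : ((c :: cs).drop 3).length = (c :: cs).length - 3 := by
        exact List.length_drop
      rw [ih ((c :: cs).drop 3).length (by omega) _ rfl (by omega)]
      simp

lemma chunks3_of_short (l : List Char) (h0 : l ≠ []) (h3 : l.length ≤ 3) :
    chunks3 l = [l] := by
  rw [chunks3_nonempty l h0, List.take_of_length_le h3,
      List.drop_eq_nil_of_le h3, chunks3_nil]

-- the heart: reversing, chunking and re-reversing equals the forward grouping
lemma rev_chunks_eq_forward : ∀ (m : Nat) (l : List Char), l.length = m →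
    ((chunks3 l.reverse).map List.reverse).reverse =
      (if l.length % 3 = 0 then [] else [l.take (l.length % 3)]) ++
        chunks3 (l.drop (l.length % 3)) := by
  intro m
  induction m using Nat.strong_induction_on with
  | _ m ih =>
    intro l hm
    by_cases h0 : l = []
    · subst h0; simp [chunks3_nil]
    · by_cases hle : l.length ≤ 3
      · have hrev0 : l.reverse ≠ [] := by simpa using h0
        rw [chunks3_of_short l.reverse hrev0 (by simpa using hle)]
        simp only [List.map_cons, List.map_nil, List.reverse_cons, List.reverse_nil,
          List.nil_append, List.reverse_reverse]
        rcases Nat.lt_or_ge l.length 3 with hlt | hge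
        · have hr : l.length % 3 = l.length := Nat.mod_eq_of_lt hlt
          rw [hr, if_neg (fun hc => h0 (List.eq_nil_of_length_eq_zero (by omega))),
              List.take_of_length_le (le_refl _), List.drop_eq_nil_of_le (le_refl _)]
          simp [chunks3_nil]
        · have h3 : l.length = 3 := by omega
          rw [h3]
          simp only [Nat.mod_self, List.drop_zero]
          rw [chunks3_of_short l h0 hle]
          simp
      · -- l.length > 3 : peel the last 3 characters
        set n := l.length with hn
        have hgt : 3 < n := by omega
        set l₁ := l.take (n - 3) with hl1
        set l₂ := l.drop (n - 3) with hl2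
        have hsplit : l = l₁ ++ l₂ := (List.take_append_drop (n - 3) l).symm
        have hlen2 : l₂.length = 3 := by rw [hl2, List.length_drop]; omega
        have hlen1 : l₁.length = n - 3 := by rw [hl1, List.length_take]; omega
        have hrev : l.reverse = l₂.reverse ++ l₁.reverse := by
          rw [hsplit, List.reverse_append]
        have hne2 : l₂ ≠ [] := by
          intro hc
          rw [hc] at hlen2
          simp at hlen2
        have hchunks : chunks3 l.reverse = l₂.reverse :: chunks3 l₁.reverse := by
          rw [hrev, chunks3_nonempty (l₂.reverse ++ l₁.reverse) (by
            intro hc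
            have := congrArg List.length hc
            simp [hlen2] at this)]
          congr 1
          · rw [List.take_append_of_le_length (by simp [hlen2]),
                List.take_of_length_le (by simp [hlen2])]
          · rw [List.drop_append_of_le_length (by simp [hlen2]),
                List.drop_eq_nil_of_le (by simp [hlen2]), List.nil_append]
        rw [hchunks]
        simp only [List.map_cons, List.reverse_cons, List.reverse_reverse]
        rw [ih l₁.length (by omega) l₁ rfl]
        set r := n % 3 with hr
        have hr1 : l₁.length % 3 = r := by rw [hlen1]; omega
        have htake : l₁.take r = l.take r := by
          rw [hl1, List.take_take]
          congr 1
          omega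
        have hdrop : l.drop r = l₁.drop r ++ l₂ := by
          conv_lhs => rw [hsplit]
          rw [List.drop_append_of_le_length (by omega)]
        have hdvd : 3 ∣ (l₁.drop r).length := by
          rw [List.length_drop, hlen1]
          omega
        rw [hr1, htake, hdrop,
            chunks3_append l₂ (l₁.drop r).length (l₁.drop r) rfl hdvd,
            chunks3_of_short l₂ hne2 (by omega)]
        simp [List.append_assoc]

-- A's group list, in closed form
lemma a_groups_eq (s : List Char) :
    (List.map (fun x => (PySem.List.slice s.reverse (some x) (some (x + 3))).reverse)
        (PySem.List.pyRange 0 (s.length : Int) 3)).reverse =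
      (if s.length % 3 = 0 then [] else [s.take (s.length % 3)]) ++
        chunks3 (s.drop (s.length % 3)) := by
  have h1 : ((s.length : Nat) : Int) = ((s.reverse.length : Nat) : Int) := by simp
  rw [h1, show (0 : Int) = ((0 : Nat) : Int) from rfl]
  rw [show (fun x => (PySem.List.slice s.reverse (some x) (some (x + 3))).reverse) =
        List.reverse ∘ (fun i => PySem.List.slice s.reverse (some i) (some (i + 3))) from rfl,
      ← List.map_map]
  rw [map_slice_chunks3 s.reverse (s.reverse.length - 0) 0 rfl]
  simp only [List.drop_zero]
  exact rev_chunks_eq_forward s.length s rfl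

-- ===== VERDICT (by name: the statement is the Claim_ definition above) =====
theorem separate_by_3_signs_from_right_spec : Claim_equal_separate_by_3_signs_from_right := by
  intro string _
  unfold Spec_separate_by_3_signs_from_right
  unfold separate_by_3_signs_from_right separate_by_3_signs_from_right_alt
  simp only [PySem.List.slice?_none_none_neg_one, Option.getD_some,
    PySem.List.foldl_append_singleton_eq_map, List.nil_append, List.length_reverse]
  rw [a_groups_eq string.toList,
      map_slice_chunks3 string.toList
        (string.toList.length - string.toList.length % 3) (string.toList.length % 3) rfl]
  rw [PySem.List.slice_to_natCast]
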